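-- pv_equiv track=rewrite | github.com/TCReaper/Computing | Computing Revision/A-level Examination Papers/2014/Submissions/Adler/2_adler.py | binary_search_amended
-- ===== SOURCE A (Python) =====
-- def binary_search_amended(this_array, find_value, low, high, calls = 0):
--     #returns INT
--
--     if low > high: #A
--         return -1, calls #not found
--     else:
--         #calculate new middle value
--         middle = (low + high) // 2 #B
--         if this_array[middle] > find_value:
--             return binary_search_amended(this_array, find_value, low, \
--                                          middle - 1, calls + 1)
--         elif this_array[middle] < find_value:
--             return binary_search_amended(this_array, find_value, middle + 1, \
--                                  high, calls + 1) #C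
--         else:
--             return middle, calls
-- ===== SOURCE B (Python) =====
-- def binary_search_amended(this_array, find_value, low, high, calls = 0):
--     # Iterative binary search: maintains low/high/calls in a while loop
--     # instead of recursing; equality is tested first.
--     while low <= high:
--         middle = (low + high) // 2
--         item = this_array[middle]
--         if item == find_value:
--             return middle, calls
--         if item < find_value:
--             low = middle + 1
--         else:
--             high = middle - 1
--         calls += 1
--     return -1, calls
-- ===== Notes on version B (the rewrite author's own statement) =====
-- stated objective: simpler
-- what changed: Replaces the recursive binary search by an iterative while-loop that updates low/high/calls in place, testing equality first; same midpoints, same call count.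
-- outside the precondition, e.g. on binary_search_amended([1, 2, 3], 3, 0, 5, 0): A returns (2, 0), B returns (2, 0)
import Mathlib
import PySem

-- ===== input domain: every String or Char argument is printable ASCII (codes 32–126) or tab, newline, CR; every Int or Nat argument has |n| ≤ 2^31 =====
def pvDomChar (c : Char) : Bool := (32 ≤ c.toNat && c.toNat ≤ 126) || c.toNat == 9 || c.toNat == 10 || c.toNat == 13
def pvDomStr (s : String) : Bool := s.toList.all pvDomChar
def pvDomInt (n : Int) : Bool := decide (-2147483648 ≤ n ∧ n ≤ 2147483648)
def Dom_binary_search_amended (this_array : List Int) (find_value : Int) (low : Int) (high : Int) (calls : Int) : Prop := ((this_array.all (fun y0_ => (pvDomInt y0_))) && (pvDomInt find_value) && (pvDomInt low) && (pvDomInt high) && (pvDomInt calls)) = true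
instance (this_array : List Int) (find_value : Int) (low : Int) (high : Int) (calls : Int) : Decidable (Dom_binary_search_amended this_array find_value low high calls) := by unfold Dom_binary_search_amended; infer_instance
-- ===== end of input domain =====

-- B replaces A's recursive binary search by an iterative while-loop over (low, high, calls); return value proved equal on Pre_.


-- ===== PORT A =====
-- Recursive transliteration of A; `pyGet?` is Python indexing (none = IndexError,
-- unreachable under Pre_, where the fallback value is never used).
def binary_search_amended (this_array : List Int) (find_value : Int) (low : Int) (high : Int) (calls : Int) : Int × Int :=
  if low > high then (-1, calls)
  else
    let middle := PySem.Int.floordiv (low + high) 2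
    match PySem.List.pyGet? this_array middle with
    | none => (-1, calls)  -- IndexError in Python; excluded by Pre_
    | some x =>
      if x > find_value then
        binary_search_amended this_array find_value low (middle - 1) (calls + 1)
      else if x < find_value then
        binary_search_amended this_array find_value (middle + 1) high (calls + 1)
      else (middle, calls)
termination_by (high - low + 1).toNat
decreasing_by
  · have h := PySem.Int.floordiv_two_mid_bounds (lo := low) (hi := high) (by omega)
    omega
  · have h := PySem.Int.floordiv_two_mid_bounds (lo := low) (hi := high) (by omega)
    omega

-- ===== PORT B =====
-- B's while-loop, realised with a fuel counter (one unit per possible iteration);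
-- state (low, high, calls) is updated as in Source B, equality tested first.
def bsaLoop (this_array : List Int) (find_value : Int) : Nat → Int → Int → Int → Int × Int
  | 0, _, _, calls => (-1, calls)
  | fuel + 1, low, high, calls =>
    if low ≤ high then
      let middle := PySem.Int.floordiv (low + high) 2
      match PySem.List.pyGet? this_array middle with
      | none => (-1, calls)  -- IndexError in Python; excluded by Pre_
      | some item =>
        if item = find_value then (middle, calls)
        else if item < find_value then bsaLoop this_array find_value fuel (middle + 1) high (calls + 1)
        else bsaLoop this_array find_value fuel low (middle - 1) (calls + 1)
    else (-1, calls)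

def binary_search_amended_alt (this_array : List Int) (find_value : Int) (low : Int) (high : Int) (calls : Int) : Int × Int :=
  bsaLoop this_array find_value (high - low + 1).toNat low high calls

-- ===== PRECONDITION & SPEC =====
-- Pre_ excludes calls with low <= high whose bounds reach outside [-len, len): there the
-- recursion can index out of range and Python raises IndexError (both A and B); on the rare
-- such inputs where the probe happens to hit the value before leaving the array, A and B
-- still return the same pair.
def Pre_binary_search_amended (this_array : List Int) (find_value : Int) (low : Int) (high : Int) (calls : Int) : Prop :=
  low > high ∨ (-(this_array.length : Int) ≤ low ∧ high < (this_array.length : Int))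
instance (this_array : List Int) (find_value : Int) (low : Int) (high : Int) (calls : Int) : Decidable (Pre_binary_search_amended this_array find_value low high calls) := by unfold Pre_binary_search_amended; infer_instance
def pvWitness_binary_search_amended : List Int × Int × Int × Int × Int := ([1, 3, 5, 7], 5, 0, 3, 0)
def Spec_binary_search_amended (this_array : List Int) (find_value : Int) (low : Int) (high : Int) (calls : Int) (out : Int × Int) : Prop := out = binary_search_amended_alt this_array find_value low high calls
instance (this_array : List Int) (find_value : Int) (low : Int) (high : Int) (calls : Int) (out : Int × Int) : Decidable (Spec_binary_search_amended this_array find_value low high calls out) := by unfold Spec_binary_search_amended; infer_instance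

-- ===== CLAIM (what is proved, stated in full; the proofs are below) =====
def Claim_equal_binary_search_amended : Prop := ∀ (this_array : List Int) (find_value : Int) (low : Int) (high : Int) (calls : Int), Dom_binary_search_amended this_array find_value low high calls → Pre_binary_search_amended this_array find_value low high calls → Spec_binary_search_amended this_array find_value low high calls (binary_search_amended this_array find_value low high calls)

-- ===== LEMMAS AND PROOFS =====

-- The loop with enough fuel computes exactly what A's recursion computes.
theorem bsaLoop_eq (this_array : List Int) (find_value : Int) :
    ∀ (fuel : Nat) (low high calls : Int), (high - low + 1).toNat ≤ fuel →
      bsaLoop this_array find_value fuel low high calls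
        = binary_search_amended this_array find_value low high calls := by
  intro fuel
  induction fuel with
  | zero =>
    intro low high calls hf
    have hlh : low > high := by omega
    rw [binary_search_amended]
    simp [bsaLoop, hlh]
  | succ n ih =>
    intro low high calls hf
    rw [binary_search_amended, bsaLoop]
    by_cases hlh : low ≤ high
    · have hm := PySem.Int.floordiv_two_mid_bounds (lo := low) (hi := high) hlh
      simp only [hlh, if_true, if_neg (by omega : ¬ low > high)]
      cases PySem.List.pyGet? this_array (PySem.Int.floordiv (low + high) 2) with
      | none => rfl
      | some x =>
        rcases lt_trichotomy x find_value with h | h | h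
        · simp only [if_neg (by omega : ¬ x > find_value),
            if_neg (by omega : ¬ x = find_value), if_pos h]
          exact ih _ high (calls + 1) (by omega)
        · simp [h]
        · simp only [if_pos h, if_neg (by omega : ¬ x = find_value),
            if_neg (by omega : ¬ x < find_value)]
          exact ih low _ (calls + 1) (by omega)
    · simp only [hlh, if_false, if_pos (by omega : low > high)]

-- ===== VERDICT (by name: the statement is the Claim_ definition above) =====
theorem binary_search_amended_spec : Claim_equal_binary_search_amended := by
  intro this_array find_value low high calls _ _
  unfold Spec_binary_search_amended binary_search_amended_alt
  exact (bsaLoop_eq this_array find_value _ low high calls le_rfl).symm
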